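-- pv_equiv track=rewrite | github.com/maverikod/vvz-code-analyzis | code_analysis/core/file_watcher_pkg/scanner.py | find_missing_files
-- ===== SOURCE A (Python) =====
-- from typing import Dict, List, Optional, Set
--
-- def find_missing_files(
--     scanned_files: Dict[str, Dict], db_files: List[Dict]
-- ) -> Set[str]:
--     """
--     Find files that exist in database but not on disk.
--
--     Args:
--         scanned_files: Files found on disk (from scan_directory)
--         db_files: Files in database
--
--     Returns:
--         Set of file paths that are missing on disk
--     """
--     missing = set()
--     for db_file in db_files:
--         file_path = db_file.get("path")
--         if file_path and file_path not in scanned_files: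
--             missing.add(file_path)
--     return missing
-- ===== SOURCE B (Python) =====
-- def find_missing_files(scanned_files, db_files):
--     # Phase 1: insertion-ordered index of all truthy db paths.
--     missing = dict.fromkeys(
--         path for f in db_files for path in (f.get("path"),) if path
--     )
--     # Phase 2: subtract by walking the scanned files, deleting present keys.
--     for present in scanned_files:
--         missing.pop(present, None)
--     return set(missing)
-- ===== Notes on version B (the rewrite author's own statement) =====
-- stated objective: alternative
-- what changed: B builds an insertion-ordered dict index of the truthy db paths first, then subtracts by iterating over scanned_files and deleting each present key from that index; A's per-item membership test against scanned_files disappears and the subtraction loop traverses the other collection.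
import Mathlib
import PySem

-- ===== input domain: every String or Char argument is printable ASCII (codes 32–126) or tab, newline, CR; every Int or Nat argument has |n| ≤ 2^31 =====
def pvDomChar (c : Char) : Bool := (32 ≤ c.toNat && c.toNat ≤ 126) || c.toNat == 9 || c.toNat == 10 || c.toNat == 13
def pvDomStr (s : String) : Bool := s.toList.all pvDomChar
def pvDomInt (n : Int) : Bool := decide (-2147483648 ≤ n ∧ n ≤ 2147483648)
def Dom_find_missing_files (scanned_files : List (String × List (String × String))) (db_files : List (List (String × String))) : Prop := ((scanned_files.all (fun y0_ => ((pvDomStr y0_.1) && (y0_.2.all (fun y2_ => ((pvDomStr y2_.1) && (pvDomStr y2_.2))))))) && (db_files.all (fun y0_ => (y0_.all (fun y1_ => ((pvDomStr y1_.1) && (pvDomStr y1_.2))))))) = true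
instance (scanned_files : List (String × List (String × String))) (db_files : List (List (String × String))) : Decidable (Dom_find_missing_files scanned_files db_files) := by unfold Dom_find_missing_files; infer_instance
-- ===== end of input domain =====

-- B reverses the traversal roles: it builds an insertion-ordered dict index of the truthy db
-- paths, then subtracts by iterating over scanned_files and deleting each present key from the
-- index (no per-item membership test against scanned_files); same result, no speed claim.
-- ===== PORT A =====
def find_missing_files (scanned_files : List (String × List (String × String))) (db_files : List (List (String × String))) : List String :=
  db_files.foldl (fun missing db_file =>
    match (PySem.Dict.mk db_file).get? "path" with
    | none => missing
    | some file_path =>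
      if file_path ≠ "" ∧ ¬ ((PySem.Dict.mk scanned_files).contains file_path = true) then
        PySem.Set.add missing file_path
      else missing) []

-- ===== PORT B =====
def find_missing_files_alt (scanned_files : List (String × List (String × String))) (db_files : List (List (String × String))) : List String :=
  -- dict.fromkeys over the generator of truthy db paths
  let missing0 : PySem.Dict String Unit :=
    (db_files.filterMap (fun f =>
      match (PySem.Dict.mk f).get? "path" with
      | none => none
      | some p => if p ≠ "" then some p else none)).foldl
      (fun d p => d.insert p ()) PySem.Dict.empty
  -- for present in scanned_files: missing.pop(present, None)
  let missing : PySem.Dict String Unit :=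
    ((PySem.Dict.mk scanned_files).keys).foldl (fun d k => d.erase k) missing0
  -- return set(missing)
  PySem.Set.ofList missing.keys

-- ===== PRECONDITION & SPEC =====
def Spec_find_missing_files (scanned_files : List (String × List (String × String))) (db_files : List (List (String × String))) (out : List String) : Prop := out = find_missing_files_alt scanned_files db_files
instance (scanned_files : List (String × List (String × String))) (db_files : List (List (String × String))) (out : List String) : Decidable (Spec_find_missing_files scanned_files db_files out) := by unfold Spec_find_missing_files; infer_instance

-- ===== CLAIM (what is proved, stated in full; the proofs are below) =====
def Claim_equal_find_missing_files : Prop := ∀ (scanned_files : List (String × List (String × String))) (db_files : List (List (String × String))), Dom_find_missing_files scanned_files db_files → Spec_find_missing_files scanned_files db_files (find_missing_files scanned_files db_files)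

-- ===== LEMMAS AND PROOFS =====

-- proof-only helpers naming the phases shared by the two reductions
def pathOf (f : List (String × String)) : Option String :=
  match (PySem.Dict.mk f).get? "path" with
  | none => none
  | some p => if p ≠ "" then some p else none

def stepFn (keys : List String) (s : List String) (p : String) : List String :=
  if keys.contains p = true then s else PySem.Set.add s p

def compStep (keys : List String) (x : List String) (y : List (String × String)) : List String :=
  match pathOf y with
  | some b => stepFn keys x b
  | none => x

-- A-side: folding the composed step over the raw list is folding the step over the filterMap
lemma foldl_compStep (keys : List String) : ∀ (l : List (List (String × String))) (init : List String),
    l.foldl (compStep keys) init = (l.filterMap pathOf).foldl (stepFn keys) init := by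
  intro l
  induction l with
  | nil => intro init; rfl
  | cons y l ih =>
    intro init
    rw [List.foldl_cons, List.filterMap_cons]
    cases hy : pathOf y with
    | none => rw [ih]; congr 1; simp [compStep, hy]
    | some b => rw [ih]; simp [compStep, hy]

-- adding an element not in `keys` commutes with taking the diff against `keys` afterwards
lemma add_diff_comm (keys t : List String) (p : String) (h : ¬ (keys.contains p = true)) :
    PySem.Set.add (PySem.Set.diff t keys) p = PySem.Set.diff (PySem.Set.add t p) keys := by
  have hk : p ∉ keys := by simpa using h
  by_cases hp : p ∈ t
  · rw [PySem.Set.add_of_mem hp,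
      PySem.Set.add_of_mem (by simp [PySem.Set.diff, List.mem_filter, hp, hk])]
  · rw [PySem.Set.add_of_not_mem hp,
      PySem.Set.add_of_not_mem (by simp [PySem.Set.diff, List.mem_filter, hp])]
    simp [PySem.Set.diff, List.filter_append, hk]

-- A-side: the guarded-add fold over a diff accumulator is the diff of the updated set
lemma fold_guard_diff (keys : List String) : ∀ (l : List String) (t : List String),
    l.foldl (stepFn keys) (PySem.Set.diff t keys) = PySem.Set.diff (PySem.Set.update t l) keys := by
  intro l
  induction l with
  | nil => intro t; rfl
  | cons p l ih =>
    intro t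
    rw [PySem.Set.update_cons]
    simp only [List.foldl_cons, stepFn]
    by_cases h : keys.contains p = true
    · rw [if_pos h, ← ih (PySem.Set.add t p)]
      congr 1
      have hk : p ∈ keys := by simpa using h
      by_cases hp : p ∈ t
      · rw [PySem.Set.add_of_mem hp]
      · rw [PySem.Set.add_of_not_mem hp]
        simp [PySem.Set.diff, List.filter_append, hk]
    · rw [if_neg h, add_diff_comm keys t p h, ih (PySem.Set.add t p)]

-- dict membership is membership in the key list
lemma contains_eq_keys_contains (d : PySem.Dict String (List (String × String))) (p : String) :
    d.contains p = d.keys.contains p := by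
  by_cases h : d.contains p = true
  · rw [h, Eq.comm, List.contains_iff_mem]
    exact (PySem.Dict.contains_iff_mem_keys _ _).1 h
  · rw [Bool.not_eq_true] at h
    rw [h, Eq.comm, List.contains_eq_mem, decide_eq_false_iff_not]
    intro hm
    rw [← PySem.Dict.contains_iff_mem_keys] at hm
    simp [hm] at h

-- A reduced to a closed form: the diff of the deduped truthy paths against the scanned keys
lemma find_missing_files_eq_diff (scanned_files : List (String × List (String × String))) (db_files : List (List (String × String))) :
    find_missing_files scanned_files db_files
      = PySem.Set.diff (PySem.Set.ofList (db_files.filterMap pathOf))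
          ((PySem.Dict.mk scanned_files).keys) := by
  unfold find_missing_files
  have hfun : (fun (missing : List String) (db_file : List (String × String)) =>
      match (PySem.Dict.mk db_file).get? "path" with
      | none => missing
      | some file_path =>
        if file_path ≠ "" ∧ ¬ ((PySem.Dict.mk scanned_files).contains file_path = true) then
          PySem.Set.add missing file_path
        else missing)
    = compStep ((PySem.Dict.mk scanned_files).keys) := by
    funext s f
    simp only [pathOf, compStep, stepFn]
    cases hg : (PySem.Dict.mk f).get? "path" with
    | none => rfl
    | some p =>
      by_cases hp : p = ""
      · subst hp; simp
      · simp only [ne_eq, hp, not_false_eq_true, if_true,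
          ← contains_eq_keys_contains (PySem.Dict.mk scanned_files) p]
        cases hc : (PySem.Dict.mk scanned_files).contains p <;> simp
  rw [hfun, foldl_compStep]
  have h0 : ([] : List String)
      = PySem.Set.diff [] ((PySem.Dict.mk scanned_files).keys) := rfl
  rw [h0, fold_guard_diff, PySem.Set.update_nil_left]

-- B-side: erasing every key of K from a dict filters its items by non-membership of the key in K
lemma items_foldl_erase (K : List String) : ∀ (d : PySem.Dict String Unit),
    (K.foldl (fun d k => d.erase k) d).items
      = d.items.filter (fun p => !(K.contains p.1)) := by
  induction K with
  | nil => intro d; simp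
  | cons k K ih =>
    intro d
    rw [List.foldl_cons, ih]
    show (PySem.Dict.erase d k).items.filter _ = _
    simp only [PySem.Dict.erase, List.filter_filter]
    congr 1
    funext p
    by_cases h : p.1 = k <;> simp [h]

-- B-side: hence the surviving keys are exactly the diff of the original keys against K
lemma keys_foldl_erase (K : List String) (d : PySem.Dict String Unit) :
    (K.foldl (fun d k => d.erase k) d).keys = PySem.Set.diff d.keys K := by
  show ((K.foldl (fun d k => d.erase k) d).items).map (·.1) = _
  rw [items_foldl_erase]
  rw [PySem.Set.diff]
  show _ = List.filter _ (d.items.map (·.1))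
  rw [List.filter_map]
  rfl

-- ===== VERDICT (by name: the statement is the Claim_ definition above) =====
theorem find_missing_files_spec : Claim_equal_find_missing_files := by
  intro scanned_files db_files _
  unfold Spec_find_missing_files
  rw [find_missing_files_eq_diff]
  unfold find_missing_files_alt
  rw [show (fun (f : List (String × String)) =>
      match (PySem.Dict.mk f).get? "path" with
      | none => none
      | some p => if p ≠ "" then some p else none) = pathOf from rfl]
  show _ = PySem.Set.ofList ((List.foldl (fun d k => d.erase k)
      (List.foldl (fun (d : PySem.Dict String Unit) p => d.insert p ()) PySem.Dict.empty
        (db_files.filterMap pathOf)) ((PySem.Dict.mk scanned_files).keys)).keys)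
  rw [keys_foldl_erase,
    PySem.Dict.keys_foldl_insert (κ := String) (ν := Unit) (db_files.filterMap pathOf) (fun (_ : PySem.Dict String Unit) (_ : String) => ()) PySem.Dict.empty]
  rw [show (PySem.Dict.empty : PySem.Dict String Unit).keys = [] from rfl,
    PySem.Set.update_nil_left]
  exact Eq.symm (PySem.Set.ofList_eq_self_of_nodup _
    (List.Nodup.filter _ (PySem.Set.nodup_ofList (db_files.filterMap pathOf))))
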